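-- pv_equiv track=rewrite | github.com/hcz2000/pywork | Tagui/FileConverter.py | parse_func_body
-- ===== SOURCE A (Python) =====
-- def parse_func_body(text):
--     bracket_stack=[]
--     status = 0
--     i=0
--     for char in text:
--         i = i + 1
--         if char == '/':
--             if status == 0:
--                 status = 1
--             elif status == 1:
--                 status = 2
--             elif status == 2:
--                 status = 2
--             elif status == 3:
--                 status = 3
--             elif status == 4:
--                 status = 0
--         elif char == '*':
--             if status == 0:
--                 status = 0
--             elif status == 1:
--                 status = 3
--             elif status == 2:
--                 status = 2
--             elif status == 3:
--                 status = 4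
--             elif status == 4:
--                 status = 4
--         elif char == '\n':
--             if status == 0:
--                 status = 0
--             elif status == 1:
--                 status = 0
--             elif status == 2:
--                 status = 0
--             elif status == 3:
--                 status = 3
--             elif status == 4:
--                  status = 3
--         else:
--             if status == 0:
--                  status = 0
--             elif status == 1:
--                  status = 0
--             elif status == 2:
--                  status = 2
--             elif status == 3:
--                  status = 3
--             elif status == 4:
--                  status = 3
--
--         if status in [2, 3, 4]:
--             continue
--
--         if char == '{':
--             bracket_stack.append('{')
--         else:
--             if char == '}':
--                 bracket_stack.pop()
--                 if len(bracket_stack) == 0: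
--                     break;
--
--     func_body=text[0:i+1]
--     remain_part=text[i+1:]
--     return func_body,remain_part
-- ===== SOURCE B (Python) =====
-- def parse_func_body(text):
--     n = len(text)
--     depth = 0
--     i = 0
--     while i < n:
--         c = text[i]
--         if c == '/' and i + 1 < n and text[i + 1] == '/':
--             i += 2
--             while i < n and text[i] != '\n':
--                 i += 1
--             if i < n:
--                 i += 1  # consume the newline that ends the line comment
--         elif c == '/' and i + 1 < n and text[i + 1] == '*':
--             i += 2
--             while i < n and not (text[i] == '*' and i + 1 < n and text[i + 1] == '/'):
--                 i += 1
--             if i < n: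
--                 i += 2  # step past the closing '*/'
--         elif c == '{':
--             depth += 1
--             i += 1
--         elif c == '}':
--             depth -= 1
--             i += 1
--             if depth == 0:
--                 break
--         else:
--             i += 1
--     return text[0:i + 1], text[i + 1:]
-- ===== Notes on version B (the rewrite author's own statement) =====
-- stated objective: simpler
-- what changed: Replaces the per-character 5-state comment DFA (four elif ladders plus a status test per char) with a plain index-based scan that skips each //- or /*-comment in one inner loop and keeps an integer brace depth instead of a stack.
-- outside the precondition, e.g. on parse_func_body('}'): A raises IndexError, B returns ('}', '')
import Mathlib
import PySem

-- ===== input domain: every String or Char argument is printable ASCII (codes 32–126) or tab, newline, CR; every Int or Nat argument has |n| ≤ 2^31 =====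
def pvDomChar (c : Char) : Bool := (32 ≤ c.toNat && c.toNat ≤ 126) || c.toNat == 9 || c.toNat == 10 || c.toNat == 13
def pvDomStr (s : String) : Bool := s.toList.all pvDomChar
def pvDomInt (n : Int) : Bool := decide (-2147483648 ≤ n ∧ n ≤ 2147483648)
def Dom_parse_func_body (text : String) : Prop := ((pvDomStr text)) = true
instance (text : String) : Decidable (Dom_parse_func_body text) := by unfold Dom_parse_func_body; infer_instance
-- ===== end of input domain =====

-- B replaces A's per-character 5-state comment DFA by a plain index scan with bulk
-- comment skipping and a depth counter (simpler decomposition; no speed claim).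

-- ===== PORT A =====
-- the status-transition table of A, branch for branch
def pvStepStatus (status : Nat) (c : Char) : Nat :=
  if c = '/' then
    if status = 0 then 1 else if status = 1 then 2 else if status = 2 then 2
    else if status = 3 then 3 else if status = 4 then 0 else status
  else if c = '*' then
    if status = 0 then 0 else if status = 1 then 3 else if status = 2 then 2
    else if status = 3 then 4 else if status = 4 then 4 else status
  else if c = '\n' then
    if status = 0 then 0 else if status = 1 then 0 else if status = 2 then 0
    else if status = 3 then 3 else if status = 4 then 3 else status
  else
    if status = 0 then 0 else if status = 1 then 0 else if status = 2 then 2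
    else if status = 3 then 3 else if status = 4 then 3 else status

-- A's for-loop: state = (bracket_stack, status, i); returns the final value of i
def pvLoopA : List Char → List Char → Nat → Nat → Nat
  | [], _, _, i => i
  | c :: rest, stack, status, i =>
    let i' := i + 1
    let st := pvStepStatus status c
    if st = 2 ∨ st = 3 ∨ st = 4 then pvLoopA rest stack st i'
    else if c = '{' then pvLoopA rest ('{' :: stack) st i'
    else if c = '}' then
      -- bracket_stack.pop(): raises IndexError on [] (excluded by Pre_), else drops the head
      (if stack = [] then i'
       else if stack.tail.length = 0 then i' else pvLoopA rest stack.tail st i')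
    else pvLoopA rest stack st i'

def parse_func_body (text : String) : String × String :=
  let l := text.toList
  let i := pvLoopA l [] 0 0
  -- text[0:i+1], text[i+1:] with 0 ≤ i: slices with nonnegative bounds = take/drop
  (String.ofList (l.take (i + 1)), String.ofList (l.drop (i + 1)))

-- ===== PORT B =====
-- Source B's outer while loop; depth is a Python int, i counts consumed characters
mutual
def pvLoopB : List Char → Int → Nat → Nat
  | [], _, i => i
  | '/' :: '/' :: rest, depth, i => pvLineB rest depth (i + 2)
  | '/' :: '*' :: rest, depth, i => pvBlockB rest depth (i + 2)
  | c :: rest, depth, i =>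
    if c = '{' then pvLoopB rest (depth + 1) (i + 1)
    else if c = '}' then (if depth - 1 = 0 then i + 1 else pvLoopB rest (depth - 1) (i + 1))
    else pvLoopB rest depth (i + 1)
-- Source B's inner scan to (and past) the newline ending a line comment
def pvLineB : List Char → Int → Nat → Nat
  | [], _, i => i
  | '\n' :: rest, depth, i => pvLoopB rest depth (i + 1)
  | _ :: rest, depth, i => pvLineB rest depth (i + 1)
-- Source B's inner scan to (and past) the '*/' closing a block comment
def pvBlockB : List Char → Int → Nat → Nat
  | [], _, i => i
  | '*' :: '/' :: rest, depth, i => pvLoopB rest depth (i + 2)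
  | _ :: rest, depth, i => pvBlockB rest depth (i + 1)
end

def parse_func_body_alt (text : String) : String × String :=
  let l := text.toList
  let i := pvLoopB l 0 0
  (String.ofList (l.take (i + 1)), String.ofList (l.drop (i + 1)))

-- ===== PRECONDITION & SPEC =====
-- the braces of the text that lie outside //- and /*-comments, in order
mutual
def pvBraces : List Char → List Char
  | [] => []
  | '/' :: '/' :: rest => pvBracesLine rest
  | '/' :: '*' :: rest => pvBracesBlock rest
  | c :: rest => if c = '{' ∨ c = '}' then c :: pvBraces rest else pvBraces rest
def pvBracesLine : List Char → List Char
  | [] => []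
  | '\n' :: rest => pvBraces rest
  | _ :: rest => pvBracesLine rest
def pvBracesBlock : List Char → List Char
  | [] => []
  | '*' :: '/' :: rest => pvBraces rest
  | _ :: rest => pvBracesBlock rest
end

-- Pre_ excludes exactly the inputs on which A raises IndexError (pop from an empty
-- list): those whose first brace outside comments is '}'.
def Pre_parse_func_body (text : String) : Prop :=
  (pvBraces text.toList).head? ≠ some '}'

instance (text : String) : Decidable (Pre_parse_func_body text) := by
  unfold Pre_parse_func_body; infer_instance

def pvWitness_parse_func_body : String := "f(){ a; /* } */ } g()"

def Spec_parse_func_body (text : String) (out : String × String) : Prop := out = parse_func_body_alt text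
instance (text : String) (out : String × String) : Decidable (Spec_parse_func_body text out) := by unfold Spec_parse_func_body; infer_instance

-- ===== CLAIM (what is proved, stated in full; the proofs are below) =====
def Claim_equal_parse_func_body : Prop := ∀ (text : String), Dom_parse_func_body text → Pre_parse_func_body text → Spec_parse_func_body text (parse_func_body text)

-- ===== LEMMAS AND PROOFS =====

-- unfold lemmas for the B-side loops / the brace filter on a cons that starts no comment
theorem pvLoopB_ord (c : Char) (rest : List Char) (d : Int) (i : Nat)
    (h : c ≠ '/' ∨ (rest.head? ≠ some '/' ∧ rest.head? ≠ some '*')) :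
    pvLoopB (c :: rest) d i =
      (if c = '{' then pvLoopB rest (d + 1) (i + 1)
       else if c = '}' then (if d - 1 = 0 then i + 1 else pvLoopB rest (d - 1) (i + 1))
       else pvLoopB rest d (i + 1)) := by
  match rest with
  | [] => rw [pvLoopB.eq_def]; split <;> simp_all
  | c2 :: r =>
    by_cases h1 : c = '/'
    · subst h1
      rcases h with h | ⟨h2, h3⟩
      · exact absurd rfl h
      · simp only [List.head?] at h2 h3
        by_cases hc2 : c2 = '/'
        · exact absurd (by rw [hc2]) h2
        · by_cases hc3 : c2 = '*'
          · exact absurd (by rw [hc3]) h3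
          · rw [pvLoopB.eq_def]
            simp [hc2, hc3]
    · rw [pvLoopB.eq_def]
      simp [h1]

theorem pvBlockB_ord (c : Char) (rest : List Char) (d : Int) (i : Nat)
    (h : c ≠ '*' ∨ rest.head? ≠ some '/') :
    pvBlockB (c :: rest) d i = pvBlockB rest d (i + 1) := by
  match rest with
  | [] => rw [pvBlockB.eq_def]; split <;> simp_all
  | c2 :: r =>
    by_cases h1 : c = '*'
    · subst h1
      rcases h with h | h2
      · exact absurd rfl h
      · simp only [List.head?] at h2
        have hc2 : c2 ≠ '/' := fun hh => h2 (by rw [hh])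
        rw [pvBlockB.eq_def]
        simp [hc2]
    · rw [pvBlockB.eq_def]
      simp [h1]

theorem pvLineB_ord (c : Char) (rest : List Char) (d : Int) (i : Nat) (h : c ≠ '\n') :
    pvLineB (c :: rest) d i = pvLineB rest d (i + 1) := by
  rw [pvLineB.eq_def]; split <;> simp_all

theorem pvBraces_ord (c : Char) (rest : List Char)
    (h : c ≠ '/' ∨ (rest.head? ≠ some '/' ∧ rest.head? ≠ some '*')) :
    pvBraces (c :: rest) =
      (if c = '{' ∨ c = '}' then c :: pvBraces rest else pvBraces rest) := by
  match rest with
  | [] => rw [pvBraces.eq_def]; split <;> simp_all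
  | c2 :: r =>
    by_cases h1 : c = '/'
    · subst h1
      rcases h with h | ⟨h2, h3⟩
      · exact absurd rfl h
      · simp only [List.head?] at h2 h3
        have hc2 : c2 ≠ '/' := fun hh => h2 (by rw [hh])
        have hc3 : c2 ≠ '*' := fun hh => h3 (by rw [hh])
        rw [pvBraces.eq_def]
        simp [hc2, hc3]
    · rw [pvBraces.eq_def]
      simp [h1]

theorem pvBracesLine_ord (c : Char) (rest : List Char) (h : c ≠ '\n') :
    pvBracesLine (c :: rest) = pvBracesLine rest := by
  rw [pvBracesLine.eq_def]; split <;> simp_all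

theorem pvBracesBlock_ord (c : Char) (rest : List Char)
    (h : c ≠ '*' ∨ rest.head? ≠ some '/') :
    pvBracesBlock (c :: rest) = pvBracesBlock rest := by
  match rest with
  | [] => rw [pvBracesBlock.eq_def]; split <;> simp_all
  | c2 :: r =>
    by_cases h1 : c = '*'
    · subst h1
      rcases h with h | h2
      · exact absurd rfl h
      · simp only [List.head?] at h2
        have hc2 : c2 ≠ '/' := fun hh => h2 (by rw [hh])
        rw [pvBracesBlock.eq_def]
        simp [hc2]
    · rw [pvBracesBlock.eq_def]
      simp [h1]

-- one ordinary (non-comment-starting) character handled at brace level: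
-- A in status s ∈ {0,1} steps to status 0 and brace-checks c; B does the same step
theorem pv_ord (c : Char) (r2 : List Char) (s : Nat) (hs : s = 0 ∨ s = 1)
    (hc : c ≠ '/' ∨ (r2.head? ≠ some '/' ∧ r2.head? ≠ some '*'))
    (hc0 : c ≠ '/') (hcs : s = 1 → c ≠ '*')
    (IH : ∀ (st' : List Char) (i' : Nat), (st' ≠ [] ∨ (pvBraces r2).head? ≠ some '}') →
      pvLoopA r2 st' 0 i' = pvLoopB r2 (st'.length : Int) i')
    (stack : List Char) (i : Nat)
    (hinv : stack ≠ [] ∨ (pvBraces (c :: r2)).head? ≠ some '}') :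
    pvLoopA (c :: r2) stack s i = pvLoopB (c :: r2) (stack.length : Int) i := by
  have hst : pvStepStatus s c = 0 := by
    rcases hs with h | h <;> subst h <;>
      by_cases h1 : c = '*' <;> by_cases h2 : c = '\n' <;>
        simp_all [pvStepStatus]
  rw [pvLoopB_ord c r2 _ _ (Or.inl hc0)]
  by_cases hb1 : c = '{'
  · subst hb1
    have h1 : pvLoopA ('{' :: r2) stack s i = pvLoopA r2 ('{' :: stack) 0 (i + 1) := by
      rw [pvLoopA]; simp [hst]
    rw [h1]
    have := IH ('{' :: stack) (i + 1) (Or.inl (by simp))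
    simpa [add_comm] using this
  · by_cases hb2 : c = '}'
    · subst hb2
      match stack with
      | [] =>
        exfalso
        rcases hinv with h' | h'
        · exact h' rfl
        · refine h' ?_
          rw [pvBraces_ord _ _ hc]
          simp
      | [x] =>
        have h1 : pvLoopA ('}' :: r2) [x] s i = i + 1 := by
          rw [pvLoopA]; simp [hst]
        rw [h1]; simp
      | x :: y :: s' =>
        have h1 : pvLoopA ('}' :: r2) (x :: y :: s') s i
            = pvLoopA r2 (y :: s') 0 (i + 1) := by
          rw [pvLoopA]; simp [hst]
        rw [h1]
        have hgoal := IH (y :: s') (i + 1) (Or.inl (by simp))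
        simp only [List.length_cons] at hgoal ⊢
        simp [hgoal]
        intro hfalse
        exfalso
        omega
    · have h1 : pvLoopA (c :: r2) stack s i = pvLoopA r2 stack 0 (i + 1) := by
        rw [pvLoopA]; simp [hst, hb1, hb2]
      rw [h1, if_neg hb1, if_neg hb2]
      refine IH stack (i + 1) ?_
      rcases hinv with h' | h'
      · exact Or.inl h'
      · right
        rw [pvBraces_ord _ _ hc] at h'
        simpa [hb1, hb2] using h'

theorem pv_main : ∀ (n : Nat) (rest : List Char), rest.length ≤ n →
    (∀ (stack : List Char) (i : Nat), (stack ≠ [] ∨ (pvBraces rest).head? ≠ some '}') →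
      pvLoopA rest stack 0 i = pvLoopB rest (stack.length : Int) i)
  ∧ (∀ (stack : List Char) (i : Nat), (stack ≠ [] ∨ (pvBracesLine rest).head? ≠ some '}') →
      pvLoopA rest stack 2 i = pvLineB rest (stack.length : Int) i)
  ∧ (∀ (stack : List Char) (i : Nat), (stack ≠ [] ∨ (pvBracesBlock rest).head? ≠ some '}') →
      pvLoopA rest stack 3 i = pvBlockB rest (stack.length : Int) i)
  ∧ (∀ (stack : List Char) (i : Nat), (stack ≠ [] ∨ (pvBracesBlock ('*' :: rest)).head? ≠ some '}') →
      pvLoopA rest stack 4 (i + 1) = pvBlockB ('*' :: rest) (stack.length : Int) i) := by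
  intro n
  induction n with
  | zero =>
    intro rest h
    have : rest = [] := List.eq_nil_of_length_eq_zero (Nat.le_zero.mp h)
    subst this
    refine ⟨?_, ?_, ?_, ?_⟩ <;> intro stack i _ <;>
      simp [pvLoopA, pvLoopB, pvLineB, pvBlockB]
  | succ n ih =>
    intro rest h
    match rest with
    | [] =>
      refine ⟨?_, ?_, ?_, ?_⟩ <;> intro stack i _ <;>
        simp [pvLoopA, pvLoopB, pvLineB, pvBlockB]
    | c :: r =>
      have hr : r.length ≤ n := by
        have := h; simp at this; omega
      refine ⟨?_, ?_, ?_, ?_⟩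
      · -- P0
        intro stack i hinv
        by_cases hc : c = '/'
        · subst hc
          match r with
          | [] =>
            simp [pvLoopA, pvLoopB, pvStepStatus]
          | c2 :: r2 =>
            have hr2 : r2.length ≤ n := by simp at hr; omega
            by_cases h2 : c2 = '/'
            · subst h2
              have h1 : pvLoopA ('/' :: '/' :: r2) stack 0 i
                  = pvLoopA r2 stack 2 (i + 2) := by
                rw [pvLoopA, pvLoopA]; simp [pvStepStatus]
              rw [h1, pvLoopB]
              refine (ih r2 hr2).2.1 stack (i + 2) ?_
              rcases hinv with h' | h'
              · exact Or.inl h'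
              · right; simpa [pvBraces] using h'
            · by_cases h3 : c2 = '*'
              · subst h3
                have h1 : pvLoopA ('/' :: '*' :: r2) stack 0 i
                    = pvLoopA r2 stack 3 (i + 2) := by
                  rw [pvLoopA, pvLoopA]; simp [pvStepStatus]
                rw [h1, pvLoopB]
                refine (ih r2 hr2).2.2.1 stack (i + 2) ?_
                rcases hinv with h' | h'
                · exact Or.inl h'
                · right; simpa [pvBraces] using h'
              · -- '/' followed by an ordinary character
                have h1 : pvLoopA ('/' :: c2 :: r2) stack 0 i
                    = pvLoopA (c2 :: r2) stack 1 (i + 1) := by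
                  rw [pvLoopA]; simp [pvStepStatus]
                have hB : pvLoopB ('/' :: c2 :: r2) (stack.length : Int) i
                    = pvLoopB (c2 :: r2) (stack.length : Int) (i + 1) := by
                  have := pvLoopB_ord '/' (c2 :: r2) (stack.length : Int) i
                    (Or.inr (by simp [h2, h3]))
                  simpa using this
                rw [h1, hB]
                refine pv_ord c2 r2 1 (Or.inr rfl) (Or.inl h2) h2 (fun _ => h3)
                  (fun st' i' h' => (ih r2 hr2).1 st' i' h') stack (i + 1) ?_
                rcases hinv with h' | h'
                · exact Or.inl h'
                · right
                  rwa [pvBraces_ord '/' (c2 :: r2) (Or.inr (by simp [h2, h3]))] at h'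
        · -- ordinary first character
          refine pv_ord c r 0 (Or.inl rfl) (Or.inl hc) hc (by simp)
            (fun st' i' h' => (ih r hr).1 st' i' h') stack i ?_
          exact hinv
      · -- P2: inside a line comment
        intro stack i hinv
        by_cases hc : c = '\n'
        · subst hc
          have h1 : pvLoopA ('\n' :: r) stack 2 i = pvLoopA r stack 0 (i + 1) := by
            rw [pvLoopA]; simp [pvStepStatus]
          rw [h1, pvLineB]
          refine (ih r hr).1 stack (i + 1) ?_
          rcases hinv with h' | h'
          · exact Or.inl h'
          · right; simpa [pvBracesLine] using h'
        · have h1 : pvLoopA (c :: r) stack 2 i = pvLoopA r stack 2 (i + 1) := by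
            rw [pvLoopA]
            by_cases h2 : c = '/' <;> by_cases h3 : c = '*' <;>
              simp_all [pvStepStatus]
          rw [h1, pvLineB_ord c r _ _ hc]
          refine (ih r hr).2.1 stack (i + 1) ?_
          rcases hinv with h' | h'
          · exact Or.inl h'
          · right; rwa [pvBracesLine_ord c r hc] at h'
      · -- P3: inside a block comment
        intro stack i hinv
        by_cases hc : c = '*'
        · subst hc
          have h1 : pvLoopA ('*' :: r) stack 3 i = pvLoopA r stack 4 (i + 1) := by
            rw [pvLoopA]; simp [pvStepStatus]
          rw [h1]
          exact (ih r hr).2.2.2 stack i hinv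
        · have h1 : pvLoopA (c :: r) stack 3 i = pvLoopA r stack 3 (i + 1) := by
            rw [pvLoopA]
            by_cases h2 : c = '/' <;> by_cases h3 : c = '\n' <;>
              simp_all [pvStepStatus]
          rw [h1, pvBlockB_ord c r _ _ (Or.inl hc)]
          refine (ih r hr).2.2.1 stack (i + 1) ?_
          rcases hinv with h' | h'
          · exact Or.inl h'
          · right; rwa [pvBracesBlock_ord c r (Or.inl hc)] at h'
      · -- P4: inside a block comment, '*' just seen
        intro stack i hinv
        by_cases hc : c = '/'
        · subst hc
          have h1 : pvLoopA ('/' :: r) stack 4 (i + 1) = pvLoopA r stack 0 (i + 2) := by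
            rw [pvLoopA]; simp [pvStepStatus]
          rw [h1, pvBlockB]
          refine (ih r hr).1 stack (i + 2) ?_
          rcases hinv with h' | h'
          · exact Or.inl h'
          · right; simpa [pvBracesBlock] using h'
        · by_cases h2 : c = '*'
          · subst h2
            have h1 : pvLoopA ('*' :: r) stack 4 (i + 1) = pvLoopA r stack 4 (i + 2) := by
              rw [pvLoopA]; simp [pvStepStatus]
            have hB : pvBlockB ('*' :: '*' :: r) (stack.length : Int) i
                = pvBlockB ('*' :: r) (stack.length : Int) (i + 1) := by
              match r with
              | [] => rw [pvBlockB.eq_def]; simp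
              | c3 :: r3 => rw [pvBlockB.eq_def]; simp
            rw [h1, hB]
            refine (ih r hr).2.2.2 stack (i + 1) ?_
            rcases hinv with h' | h'
            · exact Or.inl h'
            · right
              have hb : pvBracesBlock ('*' :: '*' :: r) = pvBracesBlock ('*' :: r) := by
                match r with
                | [] => rw [pvBracesBlock.eq_def]; simp
                | c3 :: r3 => rw [pvBracesBlock.eq_def]; simp
              rwa [hb] at h'
          · have h1 : pvLoopA (c :: r) stack 4 (i + 1) = pvLoopA r stack 3 (i + 2) := by
              rw [pvLoopA]
              by_cases h3 : c = '\n' <;> simp_all [pvStepStatus]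
            have hB : pvBlockB ('*' :: c :: r) (stack.length : Int) i
                = pvBlockB r (stack.length : Int) (i + 2) := by
              rw [pvBlockB_ord '*' (c :: r) _ _ (Or.inr (by simp [hc])),
                  pvBlockB_ord c r _ _ (Or.inl h2)]
            rw [h1, hB]
            refine (ih r hr).2.2.1 stack (i + 2) ?_
            rcases hinv with h' | h'
            · exact Or.inl h'
            · right
              rw [pvBracesBlock_ord '*' (c :: r) (Or.inr (by simp [hc])),
                  pvBracesBlock_ord c r (Or.inl h2)] at h'
              exact h'

-- ===== VERDICT (by name: the statement is the Claim_ definition above) =====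
theorem parse_func_body_spec : Claim_equal_parse_func_body := by
  intro text _ hpre
  have h := (pv_main text.toList.length text.toList le_rfl).1 [] 0 (Or.inr hpre)
  simp only [List.length_nil, Nat.cast_zero] at h
  simp only [Spec_parse_func_body, parse_func_body, parse_func_body_alt, h]
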